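-- pv_equiv track=rewrite | github.com/Kelvin18710/baseline | evosuite/run.py | signature_to_evosuite_method
-- ===== SOURCE A (Python) =====
-- from typing import List, Optional, Tuple
--
-- def extract_method_name(signature: str) -> str:
--     head = signature.split("(")[0].strip()
--     if not head:
--         return ""
--     parts = head.split()
--     return parts[-1] if parts else ""
--
-- def signature_to_evosuite_method(signature: str) -> Optional[str]:
--     if not signature:
--         return None
--     s = signature.strip()
--     if " throws " in s:
--         s = s.split(" throws ", 1)[0].strip()
--     if s.endswith(";"):
--         s = s[:-1].strip()
--     name = extract_method_name(s)
--     if not name: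
--         return None
--     if "(" not in s or ")" not in s:
--         return None
--     params_str = s[s.find("(") + 1:s.rfind(")")]
--     params = [p.strip() for p in params_str.split(",") if p.strip()]
--     return "{0}({1})".format(name, ",".join(params))
-- ===== SOURCE B (Python) =====
-- from typing import Optional
--
-- def signature_to_evosuite_method(signature: str) -> Optional[str]:
--     # Single left-to-right character scan instead of chained split/find/rfind.
--     if not signature:
--         return None
--     s = signature.strip()
--     if " throws " in s:
--         s = s.split(" throws ", 1)[0].strip()
--     if s.endswith(";"):
--         s = s[:-1].strip()
--     name = ""
--     cur = ""
--     seen_open = False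
--     seen_close = False
--     buf = ""
--     last_close = 0
--     for ch in s:
--         if not seen_open:
--             if ch == "(":
--                 if cur:
--                     name = cur
--                     cur = ""
--                 seen_open = True
--             elif ch.isspace():
--                 if cur:
--                     name = cur
--                     cur = ""
--             else:
--                 cur += ch
--         else:
--             if ch == ")":
--                 last_close = len(buf)
--             buf += ch
--         if ch == ")":
--             seen_close = True
--     if not seen_open and cur:
--         name = cur
--     if not name:
--         return None
--     if not seen_open or not seen_close:
--         return None
--     parts = []
--     for p in buf[:last_close].split(","):
--         q = p.strip()
--         if q:
--             parts.append(q)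
--     return name + "(" + ",".join(parts) + ")"
-- ===== Notes on version B (the rewrite author's own statement) =====
-- stated objective: alternative
-- what changed: B replaces A's chained split/find/rfind passes over the cleaned signature with a single left-to-right character scan that tracks the last word before the first opening parenthesis, the text after it, and the position of the last closing parenthesis in one pass.
import Mathlib
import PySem

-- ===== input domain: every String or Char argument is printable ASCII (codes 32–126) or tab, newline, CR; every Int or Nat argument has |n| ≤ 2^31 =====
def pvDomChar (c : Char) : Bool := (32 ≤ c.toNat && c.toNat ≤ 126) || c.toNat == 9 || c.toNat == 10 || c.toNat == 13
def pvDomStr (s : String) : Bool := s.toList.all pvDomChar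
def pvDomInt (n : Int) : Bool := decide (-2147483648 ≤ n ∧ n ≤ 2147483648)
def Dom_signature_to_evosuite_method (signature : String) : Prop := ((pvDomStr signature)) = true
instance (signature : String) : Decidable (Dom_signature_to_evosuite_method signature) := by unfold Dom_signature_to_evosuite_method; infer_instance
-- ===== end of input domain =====

-- B replaces A's chained split/find/rfind passes with one left-to-right character scan; same O(n) cost (objective: alternative).
-- (Both ports share the same preprocessing lines on purpose: A and B clean the signature identically; only the parsing after it differs.)

-- ===== PORT A =====
-- literal transliteration of A's helper extract_method_name
def extractMethodName (signature : List Char) : List Char :=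
  let head := PySem.Chars.strip ((PySem.Chars.splitOn signature ['(']).headD [])
  if head = [] then []
  else
    let parts := PySem.Chars.split₀ head
    match parts.getLast? with
    | some p => p
    | none => []

-- the shared preprocessing lines of A (strip, drop " throws " suffix, drop trailing ';')
def preprocA (cs : List Char) : List Char :=
  let s1 := PySem.Chars.strip cs
  let s2 := if PySem.Chars.isIn (" throws ".toList) s1 then
      PySem.Chars.strip ((PySem.Chars.splitOnMax s1 (" throws ".toList) 1).headD [])
    else s1
  if PySem.Chars.endswith s2 [';'] then PySem.Chars.strip (PySem.List.slice s2 none (some (-1))) else s2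

-- the rest of A's body, on the cleaned signature
def tailA (s : List Char) : Option String :=
  let name := extractMethodName s
  if name = [] then none
  else if (!(PySem.Chars.isIn ['('] s) || !(PySem.Chars.isIn [')'] s)) then none
  else
    let i := PySem.Chars.find s ['(']
    let j := PySem.Chars.rfind s [')']
    let paramsStr := PySem.List.slice s (some (i + 1)) (some j)
    let params := ((PySem.Chars.splitOn paramsStr [',']).filter
        (fun p => PySem.Chars.strip p ≠ [])).map PySem.Chars.strip
    some (String.ofList (name ++ ['('] ++ PySem.Chars.join [','] params ++ [')']))

def signature_to_evosuite_method (signature : String) : Option String :=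
  let cs := signature.toList
  if cs = [] then none
  else tailA (preprocA cs)

-- ===== PORT B =====
structure ScanSt where
  name : List Char
  cur : List Char
  seenOpen : Bool
  seenClose : Bool
  buf : List Char
  lastClose : Nat
deriving Repr, DecidableEq

-- one step of B's single character scan
def scanStep (st : ScanSt) (ch : Char) : ScanSt :=
  let st' :=
    if st.seenOpen = false then
      if ch = '(' then
        if st.cur ≠ [] then { st with name := st.cur, cur := [], seenOpen := true }
        else { st with seenOpen := true }
      else if PySem.Chars.isspace ch then
        if st.cur ≠ [] then { st with name := st.cur, cur := [] } else st
      else { st with cur := st.cur ++ [ch] }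
    else
      if ch = ')' then { st with lastClose := st.buf.length, buf := st.buf ++ [ch] }
      else { st with buf := st.buf ++ [ch] }
  if ch = ')' then { st' with seenClose := true } else st'

-- B's preprocessing (same cleaning lines as A)
def preprocB (cs : List Char) : List Char :=
  let s1 := PySem.Chars.strip cs
  let s2 := if PySem.Chars.isIn (" throws ".toList) s1 then
      PySem.Chars.strip ((PySem.Chars.splitOnMax s1 (" throws ".toList) 1).headD [])
    else s1
  if PySem.Chars.endswith s2 [';'] then PySem.Chars.strip (PySem.List.slice s2 none (some (-1))) else s2

-- the rest of B's body: fold the scan over the cleaned signature, then assemble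
def tailB (s : List Char) : Option String :=
  let st := s.foldl scanStep ⟨[], [], false, false, [], 0⟩
  let name := if st.seenOpen = false ∧ st.cur ≠ [] then st.cur else st.name
  if name = [] then none
  else if (!st.seenOpen || !st.seenClose) then none
  else
    let params := (PySem.Chars.splitOn (st.buf.take st.lastClose) [',']).foldl
      (fun acc p => let q := PySem.Chars.strip p; if q ≠ [] then acc ++ [q] else acc) []
    some (String.ofList (name ++ ['('] ++ PySem.Chars.join [','] params ++ [')']))

def signature_to_evosuite_method_alt (signature : String) : Option String :=
  let cs := signature.toList
  if cs = [] then none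
  else tailB (preprocB cs)

-- ===== PRECONDITION & SPEC =====
def Spec_signature_to_evosuite_method (signature : String) (out : Option String) : Prop := out = signature_to_evosuite_method_alt signature
instance (signature : String) (out : Option String) : Decidable (Spec_signature_to_evosuite_method signature out) := by unfold Spec_signature_to_evosuite_method; infer_instance

-- ===== CLAIM (what is proved, stated in full; the proofs are below) =====
def Claim_equal_signature_to_evosuite_method : Prop := ∀ (signature : String), Dom_signature_to_evosuite_method signature → Spec_signature_to_evosuite_method signature (signature_to_evosuite_method signature)

-- ===== LEMMAS AND PROOFS =====

-- name/cur part of the scan, as a pair fold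
def tokStep (st : List Char × List Char) (ch : Char) : List Char × List Char :=
  if PySem.Chars.isspace ch then
    (if st.2 ≠ [] then (st.2, ([] : List Char)) else (st.1, ([] : List Char)))
  else (st.1, st.2 ++ [ch])

def finalize (st : List Char × List Char) : List Char :=
  if st.2 ≠ [] then st.2 else st.1

-- index of the LAST occurrence of c in l
def lastPos (c : Char) : List Char → Option Nat
  | [] => none
  | x :: t => match lastPos c t with
    | some k => some (k + 1)
    | none => if x = c then some 0 else none

lemma singleton_isPrefixOf (c : Char) (t : List Char) :
    [c].isPrefixOf t = true ↔ t.head? = some c := by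
  simp only [List.isPrefixOf_iff_prefix]
  cases t with
  | nil => simp
  | cons x xs => simp [List.cons_prefix_cons, eq_comm]

lemma lastPos_spec_none (c : Char) (s : List Char) (h : lastPos c s = none) :
    ∀ j : Nat, s[j]? ≠ some c := by
  induction s with
  | nil => simp
  | cons x t ih =>
    simp only [lastPos] at h
    cases hlp : lastPos c t with
    | some k => rw [hlp] at h; simp at h
    | none =>
      rw [hlp] at h
      split_ifs at h with hx
      intro j
      cases j with
      | zero => simpa using hx
      | succ j' => simpa using ih hlp j'

lemma lastPos_spec_some (c : Char) (s : List Char) (m : Nat) (h : lastPos c s = some m) :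
    s[m]? = some c ∧ ∀ j : Nat, m < j → s[j]? ≠ some c := by
  induction s generalizing m with
  | nil => simp [lastPos] at h
  | cons x t ih =>
    simp only [lastPos] at h
    cases hlp : lastPos c t with
    | some k =>
      rw [hlp] at h
      simp only [Option.some.injEq] at h
      subst h
      obtain ⟨h1, h2⟩ := ih k hlp
      refine ⟨by simpa using h1, ?_⟩
      intro j hj
      cases j with
      | zero => omega
      | succ j' => simpa using h2 j' (by omega)
    | none =>
      rw [hlp] at h
      split_ifs at h with hx
      · simp only [Option.some.injEq] at h
        subst h; subst hx
        refine ⟨by simp, ?_⟩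
        intro j hj
        cases j with
        | zero => omega
        | succ j' => simpa using lastPos_spec_none _ t hlp j'

lemma lastPos_append (c : Char) (a b : List Char) :
    lastPos c (a ++ b) = match lastPos c b with
      | some k => some (a.length + k)
      | none => lastPos c a := by
  induction a with
  | nil => cases h : lastPos c b <;> simp [lastPos, h]
  | cons x t ih =>
    simp only [List.cons_append, lastPos, ih]
    cases lastPos c b with
    | some k => simp [Nat.add_assoc, Nat.add_comm, Nat.add_left_comm]
    | none => cases lastPos c t <;> simp

lemma rfind_go_none (s : List Char) (c : Char) (k : Nat)
    (h : ∀ j : Nat, j ≤ k → s[j]? ≠ some c) :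
    PySem.Chars.rfind.go s [c] k = -1 := by
  induction k with
  | zero =>
    rw [PySem.Chars.rfind.go.eq_def]
    have : [c].isPrefixOf s ≠ true := by
      rw [Ne, singleton_isPrefixOf]
      simpa [List.head?_eq_getElem?] using h 0 (le_refl 0)
    simp [this]
  | succ k' ih =>
    rw [PySem.Chars.rfind.go.eq_def]
    have : [c].isPrefixOf (s.drop (k' + 1)) ≠ true := by
      rw [Ne, singleton_isPrefixOf]
      simpa [List.head?_eq_getElem?, List.getElem?_drop] using h (k' + 1) (le_refl _)
    simp only [this, if_neg, Bool.not_eq_true] at *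
    simpa [this] using ih (fun j hj => h j (by omega))

lemma rfind_go_some (s : List Char) (c : Char) (m k : Nat)
    (hm : s[m]? = some c) (hmax : ∀ j : Nat, m < j → j ≤ k → s[j]? ≠ some c) (hmk : m ≤ k) :
    PySem.Chars.rfind.go s [c] k = (m : Int) := by
  induction k with
  | zero =>
    have hm0 : m = 0 := by omega
    subst hm0
    rw [PySem.Chars.rfind.go.eq_def]
    have : [c].isPrefixOf s = true := by
      rw [singleton_isPrefixOf]
      simpa [List.head?_eq_getElem?] using hm
    simp [this]
  | succ k' ih =>
    rw [PySem.Chars.rfind.go.eq_def]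
    by_cases he : m = k' + 1
    · subst he
      have hpre : [c].isPrefixOf (s.drop (k' + 1)) = true := by
        rw [singleton_isPrefixOf]
        simpa [List.head?_eq_getElem?, List.getElem?_drop] using hm
      simp [hpre]
    · have hle : m ≤ k' := by omega
      have : [c].isPrefixOf (s.drop (k' + 1)) ≠ true := by
        rw [Ne, singleton_isPrefixOf]
        simpa [List.head?_eq_getElem?, List.getElem?_drop] using hmax (k' + 1) (by omega) (le_refl _)
      simpa [this] using ih (fun j h1 h2 => hmax j h1 (by omega)) hle

lemma rfind_eq_lastPos (c : Char) (s : List Char) :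
    PySem.Chars.rfind s [c] = match lastPos c s with
      | some m => (m : Int)
      | none => -1 := by
  cases h : lastPos c s with
  | some m =>
    obtain ⟨h1, h2⟩ := lastPos_spec_some c s m h
    have hm : m < s.length := by
      by_contra hc
      rw [List.getElem?_eq_none (by omega)] at h1
      simp at h1
    exact rfind_go_some s c m s.length h1 (fun j hj _ => h2 j hj) (by omega)
  | none =>
    exact rfind_go_none s c s.length (fun j _ => lastPos_spec_none c s h j)

lemma fold_no_open (l : List Char) (st : ScanSt) (h : st.seenOpen = false) (hl : '(' ∉ l) :
    l.foldl scanStep st =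
      { name := (l.foldl tokStep (st.name, st.cur)).1,
        cur := (l.foldl tokStep (st.name, st.cur)).2,
        seenOpen := false,
        seenClose := st.seenClose || l.any (· = ')'),
        buf := st.buf, lastClose := st.lastClose } := by
  induction l generalizing st with
  | nil => cases st; simp_all
  | cons x t ih =>
    simp only [List.mem_cons, not_or] at hl
    obtain ⟨hx, ht⟩ := hl
    have hstep : scanStep st x =
        { name := (tokStep (st.name, st.cur) x).1, cur := (tokStep (st.name, st.cur) x).2,
          seenOpen := false, seenClose := st.seenClose || (x = ')'), buf := st.buf,
          lastClose := st.lastClose } := by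
      cases st with
      | mk n cu so sc b lc =>
        simp only [ScanSt.seenOpen] at h; subst h
        simp only [scanStep, tokStep]
        split_ifs <;> simp_all
    rw [List.foldl_cons, List.foldl_cons, hstep, ih _ rfl ht]
    simp [Bool.or_assoc]

lemma fold_open (l : List Char) (st : ScanSt) (h : st.seenOpen = true) :
    l.foldl scanStep st =
      { st with
        seenClose := st.seenClose || l.any (· = ')'),
        buf := st.buf ++ l,
        lastClose := match lastPos ')' l with
          | some k => st.buf.length + k
          | none => st.lastClose } := by
  induction l generalizing st with
  | nil => cases st; simp_all [lastPos]
  | cons x t ih =>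
    rw [List.foldl_cons, ih _ (by cases st; simp_all [scanStep]; split_ifs <;> simp_all)]
    cases st with
    | mk n cu so sc b lc =>
      simp only at h; subst h
      by_cases hx : x = ')'
      · subst hx
        simp [scanStep, lastPos]
        cases hlp : lastPos ')' t <;> simp [hlp] <;> omega
      · simp [scanStep, hx, lastPos]
        cases hlp : lastPos ')' t <;> simp [hlp, hx, Bool.or_assoc] <;> omega

lemma splitOn_go_head (c : Char) (l cur : List Char) (acc : List (List Char)) (fuel : Nat) (hf : l.length ≤ fuel) :
    ∃ tail, PySem.Chars.splitOn.go [c] fuel l cur acc =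
      acc.reverse ++ (cur.reverse ++ l.takeWhile (· ≠ c)) :: tail := by
  induction l generalizing fuel cur acc with
  | nil =>
    rw [PySem.Chars.splitOn.go.eq_def]
    cases fuel <;> exact ⟨[], by simp⟩
  | cons x t ih =>
    cases fuel with
    | zero => simp at hf
    | succ f =>
      rw [PySem.Chars.splitOn.go.eq_def]
      by_cases hx : x = c
      · subst hx
        have hpre : [x].isPrefixOf (x :: t) = true := by rw [singleton_isPrefixOf]; simp
        obtain ⟨tail, htail⟩ := ih [] ((cur.reverse) :: acc) f (by simpa using hf)
        refine ⟨(List.takeWhile (fun y => decide (y ≠ x)) t) :: tail, ?_⟩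
        simp only [hpre, if_pos]
        simpa using htail
      · have hpre : [c].isPrefixOf (x :: t) ≠ true := by
          rw [Ne, singleton_isPrefixOf]
          simp only [List.head?_cons, Option.some.injEq]
          exact fun h => hx h
        simp only [hpre, if_neg, Bool.not_eq_true]
        obtain ⟨tail, htail⟩ := ih (x :: cur) acc f (by simpa using hf)
        refine ⟨tail, ?_⟩
        simp only [Bool.not_eq_true] at hpre
        simp [hpre, htail, List.takeWhile_cons, hx]

lemma splitOn_head (c : Char) (s : List Char) :
    (PySem.Chars.splitOn s [c]).headD [] = s.takeWhile (· ≠ c) := by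
  obtain ⟨tail, htail⟩ := splitOn_go_head c s [] [] (s.length + 1) (by omega)
  show (PySem.Chars.splitOn.go [c] (s.length + 1) s [] []).headD [] = _
  simp [htail]

lemma split₀_go_last (l cur : List Char) (acc : List (List Char)) :
    ((PySem.Chars.split₀.go l cur acc).getLast?).getD [] =
      finalize (l.foldl tokStep (acc.headD [], cur.reverse)) := by
  induction l generalizing cur acc with
  | nil =>
    rw [PySem.Chars.split₀.go.eq_def]
    by_cases hc : cur = []
    · subst hc
      simp [finalize, List.getLast?_reverse]
    · simp [hc, finalize, List.isEmpty_iff, List.getLast?_concat]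
  | cons x t ih =>
    rw [PySem.Chars.split₀.go.eq_def]
    by_cases hsp : PySem.Chars.isspace x = true
    · by_cases hc : cur = []
      · subst hc
        simp only [hsp, if_pos, List.isEmpty_nil, List.foldl_cons, tokStep, List.reverse_nil]
        simpa using ih [] acc
      · simp only [hsp, if_pos, List.isEmpty_iff, hc, if_neg, List.foldl_cons, tokStep]
        have := ih [] (cur.reverse :: acc)
        simp only [List.headD_cons, List.reverse_nil] at this
        rw [if_neg (by simpa using hc)] at *
        simp [this, hc]
    · simp only [hsp, if_neg, List.foldl_cons, tokStep, Bool.not_eq_true]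
      have := ih (x :: cur) acc
      simp only [List.reverse_cons] at this
      simp [hsp, this]

lemma tok_lstrip (l : List Char) (n : List Char) :
    (l.dropWhile PySem.Chars.isspace).foldl tokStep (n, []) = l.foldl tokStep (n, []) := by
  induction l with
  | nil => rfl
  | cons x t ih =>
    by_cases hsp : PySem.Chars.isspace x = true
    · rw [List.dropWhile_cons_of_pos hsp, ih, List.foldl_cons]
      simp [tokStep, hsp]
    · rw [List.dropWhile_cons_of_neg (by simpa using hsp)]

lemma finalize_trailing_ws (ws : List Char) (st : List Char × List Char)
    (h : ∀ c ∈ ws, PySem.Chars.isspace c = true) :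
    finalize (ws.foldl tokStep st) = finalize st := by
  induction ws generalizing st with
  | nil => rfl
  | cons w ws' ih =>
    have hw : PySem.Chars.isspace w = true := h w (by simp)
    rw [List.foldl_cons, ih _ (fun c hc => h c (by simp [hc]))]
    by_cases hc : st.2 = [] <;> simp [tokStep, hw, finalize, hc]

lemma finalize_strip (l : List Char) :
    finalize ((PySem.Chars.strip l).foldl tokStep ([], [])) = finalize (l.foldl tokStep ([], [])) := by
  have hy : ∀ y : List Char, PySem.Chars.rstrip y ++ (y.reverse.takeWhile PySem.Chars.isspace).reverse = y := by
    intro y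
    rw [PySem.Chars.rstrip, ← List.reverse_append, List.takeWhile_append_dropWhile,
      List.reverse_reverse]
  have hws : ∀ (y : List Char) (c : Char), c ∈ (y.reverse.takeWhile PySem.Chars.isspace).reverse → PySem.Chars.isspace c = true := by
    intro y c hc
    exact List.mem_takeWhile_imp (List.mem_reverse.mp hc)
  have h2 : ∀ y : List Char, finalize (y.foldl tokStep ([], [])) =
      finalize ((PySem.Chars.rstrip y).foldl tokStep ([], [])) := by
    intro y
    conv_lhs => rw [← hy y]
    rw [List.foldl_append, finalize_trailing_ws _ _ (hws y)]
  have hstrip : PySem.Chars.strip l = PySem.Chars.rstrip (PySem.Chars.lstrip l) := rfl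
  rw [hstrip, ← h2 (PySem.Chars.lstrip l), PySem.Chars.lstrip, tok_lstrip]

lemma extract_eq_tok (s : List Char) :
    extractMethodName s = finalize ((s.takeWhile (· ≠ '(')).foldl tokStep ([], [])) := by
  unfold extractMethodName
  rw [splitOn_head]
  set p := s.takeWhile (· ≠ '(') with hp
  by_cases hsp : PySem.Chars.strip p = []
  · rw [if_pos hsp, ← finalize_strip, hsp]
    rfl
  · rw [if_neg hsp]
    have hthis : PySem.Chars.split₀ (PySem.Chars.strip p) = PySem.Chars.split₀.go (PySem.Chars.strip p) [] [] := rfl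
    have h2 := split₀_go_last (PySem.Chars.strip p) [] []
    rw [← hthis] at h2
    simp only [List.headD_nil, List.reverse_nil] at h2
    have hm : ∀ o : Option (List Char), (match o with | some q => q | none => ([] : List Char)) = o.getD [] := by
      intro o; cases o <;> rfl
    rw [hm, h2, finalize_strip]

lemma find_singleton (c : Char) (p q : List Char) (hp : c ∉ p) :
    PySem.Chars.find (p ++ c :: q) [c] = (p.length : Int) := by
  set s := p ++ c :: q with hs
  have hin : [c] <:+: s := by
    rw [List.singleton_infix_iff]
    simp [hs]
  have hnn : 0 ≤ PySem.Chars.find s [c] := (PySem.Chars.find_nonneg_iff s [c]).mpr hin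
  obtain ⟨hpref, hmin⟩ := PySem.Chars.find_spec hnn
  set f := (PySem.Chars.find s [c]).toNat with hf
  have hfe : s[f]? = some c := by
    obtain ⟨t', ht'⟩ := hpref
    rw [← List.head?_drop, ← ht']
    rfl
  have hne : f = p.length := by
    rcases lt_trichotomy f p.length with hlt | heq | hgt
    · exfalso
      rw [List.getElem?_append_left hlt] at hfe
      exact hp (List.mem_of_getElem? hfe)
    · exact heq
    · exfalso
      refine hmin p.length hgt ?_
      rw [hs, List.drop_left]
      exact ⟨q, rfl⟩
  have : PySem.Chars.find s [c] = (f : Int) := (Int.toNat_of_nonneg hnn).symm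
  rw [this, hne]


lemma takeWhile_not_mem (p q : List Char) (hp : '(' ∉ p) :
    (p ++ '(' :: q).takeWhile (· ≠ '(') = p := by
  induction p with
  | nil => simp
  | cons x t ih =>
    simp only [List.mem_cons, not_or] at hp
    simp only [List.cons_append, List.takeWhile_cons]
    rw [if_pos (by simpa using (fun h => hp.1 h.symm)), ih hp.2]

lemma exists_split (s : List Char) (h : '(' ∈ s) :
    ∃ p q, s = p ++ '(' :: q ∧ '(' ∉ p := by
  induction s with
  | nil => simp at h
  | cons x t ih =>
    by_cases hx : x = '('
    · exact ⟨[], t, by simp [hx], by simp⟩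
    · have ht : '(' ∈ t := by
        rcases List.mem_cons.mp h with h1 | h1
        · exact absurd h1.symm hx
        · exact h1
      obtain ⟨p, q, hpq, hnp⟩ := ih ht
      exact ⟨x :: p, q, by simp [hpq], by simp [hnp]; exact fun hh => hx hh.symm⟩

def rhsPQ (p q : List Char) : Option String :=
  let fin := finalize (p.foldl tokStep ([], []))
  if fin = [] then none
  else if !(p.any (· = ')') || q.any (· = ')')) then none
  else
    let ps := q.take ((lastPos ')' q).getD 0)
    let params := ((PySem.Chars.splitOn ps [',']).filter
        (fun r => PySem.Chars.strip r ≠ [])).map PySem.Chars.strip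
    some (String.ofList (fin ++ ['('] ++ PySem.Chars.join [','] params ++ [')']))


def bodyB (st : ScanSt) : Option String :=
  let name := if st.seenOpen = false ∧ st.cur ≠ [] then st.cur else st.name
  if name = [] then none
  else if (!st.seenOpen || !st.seenClose) then none
  else
    let params := (PySem.Chars.splitOn (st.buf.take st.lastClose) [',']).foldl
      (fun acc p => let q := PySem.Chars.strip p; if q ≠ [] then acc ++ [q] else acc) []
    some (String.ofList (name ++ ['('] ++ PySem.Chars.join [','] params ++ [')']))

lemma tailB_def (s : List Char) : tailB s = bodyB (s.foldl scanStep ⟨[], [], false, false, [], 0⟩) := rfl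

lemma params_fold_eq (ps : List Char) :
    (PySem.Chars.splitOn ps [',']).foldl
      (fun acc p => let q := PySem.Chars.strip p; if q ≠ [] then acc ++ [q] else acc) [] =
    ((PySem.Chars.splitOn ps [',']).filter
      (fun r => PySem.Chars.strip r ≠ [])).map PySem.Chars.strip := by
  simp only []
  rw [PySem.List.foldl_append_ite (p := fun r => PySem.Chars.strip r ≠ [])
    (f := PySem.Chars.strip)]
  simp


lemma scanStep_open (n cu : List Char) (sc : Bool) (b : List Char) (lc : Nat) :
    scanStep ⟨n, cu, false, sc, b, lc⟩ '(' = ⟨finalize (n, cu), [], true, sc, b, lc⟩ := by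
  by_cases h2 : cu = [] <;> simp [scanStep, finalize, h2]

lemma tailB_mem (p q : List Char) (hp : '(' ∉ p) :
    tailB (p ++ '(' :: q) = rhsPQ p q := by
  rw [tailB_def, List.foldl_append, List.foldl_cons,
    fold_no_open p _ rfl hp, scanStep_open, fold_open _ _ rfl]
  unfold bodyB rhsPQ
  rw [params_fold_eq]
  have hlc : (match lastPos ')' q with
      | some k => (List.length (ScanSt.buf ⟨[], [], false, false, [], 0⟩)) + k
      | none => ScanSt.lastClose ⟨[], [], false, false, [], 0⟩) = (lastPos ')' q).getD 0 := by
    cases lastPos ')' q <;> simp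
  simp only [hlc]
  simp [Bool.or_assoc]

lemma tailB_nomem (s : List Char) (h : '(' ∉ s) : tailB s = none := by
  rw [tailB_def, fold_no_open s _ rfl h]
  unfold bodyB
  by_cases hn : (if (false = false) ∧ (s.foldl tokStep ([], [])).2 ≠ [] then
      (s.foldl tokStep ([], [])).2 else (s.foldl tokStep ([], [])).1) = [] <;> simp_all

lemma isIn_iff_mem (c : Char) (s : List Char) :
    PySem.Chars.isIn [c] s = true ↔ c ∈ s := by
  rw [PySem.Chars.isIn_iff_infix, List.singleton_infix_iff]

lemma tailA_nomem (s : List Char) (h : '(' ∉ s) : tailA s = none := by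
  unfold tailA
  have h1 : PySem.Chars.isIn ['('] s = false := by
    rw [← Bool.not_eq_true, isIn_iff_mem]
    exact h
  by_cases hn : extractMethodName s = [] <;> simp [hn, h1]

lemma lastPos_of_mem (c : Char) (l : List Char) (h : c ∈ l) :
    ∃ m, lastPos c l = some m ∧ m < l.length := by
  cases hl : lastPos c l with
  | none =>
    exfalso
    obtain ⟨i, hi, hg⟩ := List.mem_iff_getElem.mp h
    exact lastPos_spec_none c l hl i (by simp [List.getElem?_eq_getElem hi, hg])
  | some m =>
    refine ⟨m, rfl, ?_⟩
    have := (lastPos_spec_some c l m hl).1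
    exact (List.getElem?_eq_some_iff.mp this).1


lemma slice_nat (s : List Char) (a b : Nat) (ha : a ≤ s.length) (hb : b ≤ s.length) :
    PySem.List.slice s (some (a : Int)) (some (b : Int)) = (s.drop a).take (b - a) := by
  simp only [PySem.List.slice, PySem.List.clampIdx]
  rw [if_neg (by omega), if_neg (by omega)]
  simp [min_eq_left ha, min_eq_left hb]

lemma sliceA (p q : List Char) (hcl : ')' ∈ p ∨ ')' ∈ q) :
    PySem.List.slice (p ++ '(' :: q)
      (some ((p.length : Int) + 1)) (some (PySem.Chars.rfind (p ++ '(' :: q) [')'])) =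
    q.take ((lastPos ')' q).getD 0) := by
  have hlen : (p ++ '(' :: q).length = p.length + 1 + q.length := by simp; omega
  rw [rfind_eq_lastPos, lastPos_append]
  have hdrop : (p ++ '(' :: q).drop (p.length + 1) = q := by
    have h' : p ++ '(' :: q = (p ++ ['(']) ++ q := by simp
    rw [h', show p.length + 1 = (p ++ ['(']).length by simp, List.drop_left]
  have hca : ((p.length : Int) + 1) = ((p.length + 1 : Nat) : Int) := by push_cast; ring
  cases hq : lastPos ')' q with
  | some k =>
    have hk : k < q.length := by
      have := (lastPos_spec_some ')' q k hq).1
      exact (List.getElem?_eq_some_iff.mp this).1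
    have hlq : lastPos ')' ('(' :: q) = some (k + 1) := by simp [lastPos, hq]
    rw [hlq]
    have hred : (match (match (some (k + 1) : Option Nat) with
        | some k => some (p.length + k)
        | none => lastPos ')' p) with
      | some m => (m : Int)
      | none => (-1 : Int)) = ((p.length + (k + 1) : Nat) : Int) := rfl
    rw [hred, hca, slice_nat _ _ _ (by omega) (by omega), hdrop]
    simp [show p.length + (k + 1) - (p.length + 1) = k by omega]
  | none =>
    have hpm : ')' ∈ p := by
      rcases hcl with h | h
      · exact h
      · exfalso
        obtain ⟨i, hi, hg⟩ := List.mem_iff_getElem.mp h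
        exact lastPos_spec_none ')' q hq i (by simp [List.getElem?_eq_getElem hi, hg])
    obtain ⟨m, hm, hml⟩ := lastPos_of_mem ')' p hpm
    have hlq : lastPos ')' ('(' :: q) = none := by simp [lastPos, hq]
    rw [hlq]
    have hred : (match (match (none : Option Nat) with
        | some k => some (p.length + k)
        | none => lastPos ')' p) with
      | some m => (m : Int)
      | none => (-1 : Int)) = (match lastPos ')' p with
      | some m => (m : Int)
      | none => (-1 : Int)) := rfl
    rw [hred, hm, hca, slice_nat _ _ _ (by omega) (by omega)]
    simp [show m - (p.length + 1) = 0 by omega]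

lemma tailA_mem (p q : List Char) (hp : '(' ∉ p) :
    tailA (p ++ '(' :: q) = rhsPQ p q := by
  have hname : extractMethodName (p ++ '(' :: q) = finalize (p.foldl tokStep ([], [])) := by
    rw [extract_eq_tok, takeWhile_not_mem p q hp]
  have h1 : PySem.Chars.isIn ['('] (p ++ '(' :: q) = true := (isIn_iff_mem _ _).mpr (by simp)
  have hmemiff : (')' ∈ p ++ '(' :: q) ↔ (')' ∈ p ∨ ')' ∈ q) := by simp
  unfold tailA rhsPQ
  rw [hname, h1]
  simp only []
  by_cases hcl : ')' ∈ p ∨ ')' ∈ q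
  · have h2 : PySem.Chars.isIn [')'] (p ++ '(' :: q) = true :=
      (isIn_iff_mem _ _).mpr (hmemiff.mpr hcl)
    have hany : (p.any (· = ')') || q.any (· = ')')) = true := by
      rcases hcl with h | h
      · simp only [Bool.or_eq_true, List.any_eq_true]
        exact Or.inl ⟨_, h, by simp⟩
      · simp only [Bool.or_eq_true, List.any_eq_true]
        exact Or.inr ⟨_, h, by simp⟩
    rw [h2, find_singleton '(' p q hp, sliceA p q hcl, hany]
    simp
  · have h2 : PySem.Chars.isIn [')'] (p ++ '(' :: q) = false := by
      rw [← Bool.not_eq_true, isIn_iff_mem]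
      exact fun h => hcl (hmemiff.mp h)
    have hany : (p.any (· = ')') || q.any (· = ')')) = false := by
      simp only [Bool.or_eq_false_iff, List.any_eq_false]
      constructor
      · intro x hx
        simp only [decide_eq_true_eq]
        exact fun he => hcl (Or.inl (he ▸ hx))
      · intro x hx
        simp only [decide_eq_true_eq]
        exact fun he => hcl (Or.inr (he ▸ hx))
    rw [h2, hany]
    by_cases hfin : finalize (p.foldl tokStep ([], [])) = [] <;> simp [hfin]

-- main tail equivalence
lemma tail_eq (s : List Char) : tailA s = tailB s := by
  by_cases h : '(' ∈ s
  · obtain ⟨p, q, rfl, hp⟩ := exists_split s h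
    rw [tailA_mem p q hp, tailB_mem p q hp]
  · rw [tailA_nomem s h, tailB_nomem s h]

-- ===== VERDICT (by name: the statement is the Claim_ definition above) =====
theorem signature_to_evosuite_method_spec : Claim_equal_signature_to_evosuite_method := by
  intro signature _
  unfold Spec_signature_to_evosuite_method signature_to_evosuite_method signature_to_evosuite_method_alt
  by_cases h : signature.toList = []
  · simp [h]
  · simp only [h, if_false]
    have hpre : preprocB = preprocA := rfl
    rw [hpre, tail_eq]
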